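-- pv_equiv track=rewrite | github.com/dobot0101/python-coding-test | group_sort.py | groupSort
-- ===== SOURCE A (Python) =====
-- import collections
--
-- def groupSort(arr):
--     arr.sort()
--
--     counter = collections.Counter(arr)
--
--     result = []
--     for key, value in counter.items():
--         result.append([key, value])
--
--     result.sort(key = lambda x:(-x[1], x[0]))
--     return result
-- ===== SOURCE B (Python) =====
-- def groupSort(arr):
--     arr.sort()
--
--     freq = {}
--     for x in arr:
--         freq[x] = freq.get(x, 0) + 1
--
--     buckets = {}
--     for k, c in freq.items():
--         buckets.setdefault(c, []).append(k)
--
--     result = []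
--     for c in sorted(buckets, reverse=True):
--         for k in sorted(buckets[c]):
--             result.append([k, c])
--     return result
-- ===== Notes on version B (the rewrite author's own statement) =====
-- stated objective: alternative
-- what changed: Replaces the single compound-key sort of (key,count) pairs by bucketing keys per count in a dict and emitting buckets in descending count order with each bucket's keys sorted ascending.
import Mathlib
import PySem

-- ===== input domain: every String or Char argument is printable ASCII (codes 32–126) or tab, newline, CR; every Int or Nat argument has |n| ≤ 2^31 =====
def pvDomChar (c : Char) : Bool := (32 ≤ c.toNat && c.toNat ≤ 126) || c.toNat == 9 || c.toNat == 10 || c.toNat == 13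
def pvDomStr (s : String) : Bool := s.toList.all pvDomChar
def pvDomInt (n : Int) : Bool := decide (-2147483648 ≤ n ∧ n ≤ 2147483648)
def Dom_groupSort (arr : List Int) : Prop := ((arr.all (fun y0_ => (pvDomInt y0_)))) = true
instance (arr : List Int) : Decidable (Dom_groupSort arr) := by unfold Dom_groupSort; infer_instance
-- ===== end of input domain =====

-- B buckets the keys by their count instead of sorting (key,count) pairs with a compound key;
-- same cost class, alternative decomposition. Both Pythons sort `arr` in place (same mutation);
-- the equivalence proved here is about the return value.

-- ===== PORT A =====
def groupSort (arr : List Int) : List (List Int) :=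
  let arr := PySem.List.sorted arr (fun x => x) false               -- arr.sort()
  let counter := PySem.Dict.counter arr                             -- collections.Counter(arr)
  let result : List (List Int) :=
    counter.items.foldl (fun result kv => result ++ [[kv.1, kv.2]]) []
  -- every element of result has length 2, so x[1]/x[0] never raise: pyGetD's default 0 is unreachable
  PySem.List.sorted2 result (fun x => -(PySem.List.pyGetD x 1 0)) (fun x => PySem.List.pyGetD x 0 0) false

-- ===== PORT B =====
def groupSort_alt (arr : List Int) : List (List Int) :=
  let arr := PySem.List.sorted arr (fun x => x) false               -- arr.sort()
  let freq : PySem.Dict Int Int :=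
    arr.foldl (fun d x => d.insert x (d.getD x 0 + 1)) PySem.Dict.empty
  let buckets : PySem.Dict Int (List Int) :=
    freq.items.foldl (fun b kc => b.modify kc.2 [] (fun l => l ++ [kc.1])) PySem.Dict.empty
  let counts := PySem.List.sorted buckets.keys (fun c => c) true
  counts.foldl (fun result c =>
    (PySem.List.sorted (buckets.getD c []) (fun k => k) false).foldl
      (fun result k => result ++ [[k, c]]) result) []

-- ===== PRECONDITION & SPEC =====
def Spec_groupSort (arr : List Int) (out : List (List Int)) : Prop := out = groupSort_alt arr
instance (arr : List Int) (out : List (List Int)) : Decidable (Spec_groupSort arr out) := by unfold Spec_groupSort; infer_instance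

-- ===== CLAIM (what is proved, stated in full; the proofs are below) =====
def Claim_equal_groupSort : Prop := ∀ (arr : List Int), Dom_groupSort arr → Spec_groupSort arr (groupSort arr)

-- ===== LEMMAS AND PROOFS =====

-- proof-only abbreviations: the sorted input, its distinct keys, the multiplicity of a key,
-- the keys holding a given count, and the distinct counts in descending order
def gsS (arr : List Int) : List Int := PySem.List.sorted arr (fun x => x) false
def gsKeys (arr : List Int) : List Int := PySem.Set.ofList (gsS arr)
def gsCnt (arr : List Int) (k : Int) : Int := ((gsS arr).count k : Int)
def gsBucket (arr : List Int) (c : Int) : List Int := (gsKeys arr).filter (fun k => gsCnt arr k == c)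
def gsCounts (arr : List Int) : List Int :=
  PySem.List.sorted (PySem.Set.ofList ((gsKeys arr).map (gsCnt arr))) (fun c => c) true
def gsKey (x : List Int) : Lex (Int × Int) := toLex (-(PySem.List.pyGetD x 1 0), PySem.List.pyGetD x 0 0)
def gsB (arr : List Int) : List (List Int) :=
  (gsCounts arr).flatMap (fun c => (PySem.List.sorted (gsBucket arr c) (fun k => k) false).map (fun k => [k, c]))
def gsP (arr : List Int) : List (List Int) := (gsKeys arr).map (fun k => [k, gsCnt arr k])

-- a sort on the compound key (k1, k2) is a sort on the lexicographic product key
theorem sorted2_eq_sorted_toLex {α : Type} (xs : List α) (k1 k2 : α → Int) :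
    PySem.List.sorted2 xs k1 k2 false
      = PySem.List.sorted xs (fun a => (toLex (k1 a, k2 a) : Lex (Int × Int))) false := by
  rw [PySem.List.sorted_eq_foldl_insertBy]
  show xs.foldl (fun acc x => PySem.List.insertBy
      (fun a b => decide (k1 a < k1 b) || (!decide (k1 b < k1 a) && decide (k2 a < k2 b))) x acc) [] = _
  have h : (fun a b => decide (k1 a < k1 b) || (!decide (k1 b < k1 a) && decide (k2 a < k2 b)))
      = (fun a b => decide ((toLex (k1 a, k2 a) : Lex (Int × Int)) < toLex (k1 b, k2 b))) := by
    funext a b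
    rcases lt_trichotomy (k1 a) (k1 b) with h1 | h1 | h1
    · simp [Prod.Lex.lt_iff, h1, asymm h1]
    · simp [Prod.Lex.lt_iff, h1]
    · simp [Prod.Lex.lt_iff, h1, asymm h1, ne_of_gt h1]
  rw [h]

-- A in normal form: the compound sort of the pair list
theorem groupSort_eq_sorted (arr : List Int) :
    groupSort arr = PySem.List.sorted (gsP arr) gsKey false := by
  show PySem.List.sorted2
      ((PySem.Dict.counter (gsS arr)).items.foldl (fun result kv => result ++ [[kv.1, kv.2]]) [])
      (fun x => -(PySem.List.pyGetD x 1 0)) (fun x => PySem.List.pyGetD x 0 0) false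
    = PySem.List.sorted (gsP arr) gsKey false
  rw [PySem.List.foldl_append_singleton_eq_map, PySem.Dict.items_counter]
  rw [sorted2_eq_sorted_toLex]
  simp only [List.nil_append, List.map_map]
  rfl

-- B's bucket dict: lookups and key list
theorem gs_buckets_getD (arr : List Int) (c : Int) :
    ((PySem.Dict.counter (gsS arr)).items.foldl
        (fun b kc => b.modify kc.2 [] (fun l => l ++ [kc.1])) PySem.Dict.empty).getD c []
      = gsBucket arr c := by
  have hswap : (PySem.Dict.counter (gsS arr)).items.foldl
        (fun b kc => b.modify kc.2 [] (fun l => l ++ [kc.1]))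
        (PySem.Dict.empty : PySem.Dict Int (List Int))
      = ((PySem.Dict.counter (gsS arr)).items.map Prod.swap).foldl
        (fun b p => b.modify p.1 [] (fun l => l ++ [p.2])) PySem.Dict.empty := by
    rw [List.foldl_map]
    rfl
  rw [hswap, PySem.Dict.getD_foldl_modify_append, PySem.Dict.items_counter]
  unfold gsBucket gsCnt gsKeys
  simp [List.map_map, List.filter_map, Function.comp_def]

theorem gs_buckets_keys (arr : List Int) :
    ((PySem.Dict.counter (gsS arr)).items.foldl
        (fun b kc => b.modify kc.2 [] (fun l => l ++ [kc.1])) PySem.Dict.empty).keys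
      = PySem.Set.ofList ((gsKeys arr).map (gsCnt arr)) := by
  have h : ((PySem.Dict.counter (gsS arr)).items.foldl
        (fun b kc => b.modify kc.2 [] (fun l => l ++ [kc.1])) PySem.Dict.empty).keys
      = PySem.Set.update (PySem.Dict.empty : PySem.Dict Int (List Int)).keys
          ((PySem.Dict.counter (gsS arr)).items.map (fun kc => kc.2)) :=
    PySem.Dict.keys_foldl_modify_key (key := fun kc : Int × Int => kc.2)
      (f := fun (_ : PySem.Dict Int (List Int)) (kc : Int × Int) => (fun l => l ++ [kc.1])) _ _ _
  rw [h, PySem.Dict.items_counter]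
  unfold gsKeys gsCnt
  simp [List.map_map, Function.comp_def]
  rfl

-- B in normal form: the buckets flattened in descending-count order
theorem groupSort_alt_eq_flatMap (arr : List Int) :
    groupSort_alt arr = gsB arr := by
  show (PySem.List.sorted
      ((PySem.Dict.counter (gsS arr)).items.foldl
        (fun b kc => b.modify kc.2 [] (fun l => l ++ [kc.1])) PySem.Dict.empty).keys
      (fun c => c) true).foldl
      (fun result c =>
        (PySem.List.sorted
          (((PySem.Dict.counter (gsS arr)).items.foldl
            (fun b kc => b.modify kc.2 [] (fun l => l ++ [kc.1])) PySem.Dict.empty).getD c [])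
          (fun k => k) false).foldl (fun result k => result ++ [[k, c]]) result) []
    = gsB arr
  have hstep : (fun (result : List (List Int)) (c : Int) =>
      (PySem.List.sorted
        (((PySem.Dict.counter (gsS arr)).items.foldl
          (fun b kc => b.modify kc.2 [] (fun l => l ++ [kc.1])) PySem.Dict.empty).getD c [])
        (fun k => k) false).foldl (fun result k => result ++ [[k, c]]) result)
    = (fun result c =>
        result ++ (PySem.List.sorted (gsBucket arr c) (fun k => k) false).map (fun k => [k, c])) := by
    funext r c
    rw [gs_buckets_getD, PySem.List.foldl_append_singleton_eq_map]
  rw [hstep, PySem.List.foldl_append_eq_flatMap, gs_buckets_keys]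
  rfl

theorem gsKey_pair (k c : Int) : gsKey [k, c] = toLex (-c, k) := rfl

theorem gs_bucket_sorted_nodup (arr : List Int) (c : Int) :
    (PySem.List.sorted (gsBucket arr c) (fun k => k) false).Nodup :=
  ((PySem.List.sorted_perm _ _ _).nodup_iff).mpr ((PySem.Set.nodup_ofList _).filter _)

theorem gs_counts_desc (arr : List Int) : (gsCounts arr).Pairwise (fun c d => d < c) := by
  have h1 := PySem.List.sorted_pairwise_rev
    (PySem.Set.ofList ((gsKeys arr).map (gsCnt arr))) (fun c => c)
  have h2 : (gsCounts arr).Nodup :=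
    ((PySem.List.sorted_perm _ _ _).nodup_iff).mpr (PySem.Set.nodup_ofList _)
  exact (h1.and h2).imp (fun h => lt_of_le_of_ne h.1 (Ne.symm h.2))

theorem gs_pairwise (arr : List Int) :
    (gsB arr).Pairwise (fun a b => gsKey a < gsKey b) := by
  unfold gsB
  rw [List.flatMap_def, List.pairwise_flatten]
  constructor
  · intro l hl
    obtain ⟨c, _, rfl⟩ := List.mem_map.mp hl
    rw [List.pairwise_map]
    have hle := PySem.List.sorted_pairwise (gsBucket arr c) (fun k => k)
    refine ((hle.and (gs_bucket_sorted_nodup arr c)).imp ?_)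
    intro a b h
    have hab := lt_of_le_of_ne h.1 h.2
    simp only [gsKey_pair, Prod.Lex.lt_iff, ofLex_toLex]
    exact Or.inr ⟨trivial, hab⟩
  · rw [List.pairwise_map]
    refine (gs_counts_desc arr).imp ?_
    intro c d hdc x hx y hy
    obtain ⟨k, _, rfl⟩ := List.mem_map.mp hx
    obtain ⟨k', _, rfl⟩ := List.mem_map.mp hy
    simp only [gsKey_pair, Prod.Lex.lt_iff, ofLex_toLex]
    omega

theorem gs_perm (arr : List Int) : (gsB arr).Perm (gsP arr) := by
  have hndB : (gsB arr).Nodup :=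
    (gs_pairwise arr).imp (fun h he => by subst he; exact lt_irrefl _ h)
  have hinj : Function.Injective (fun k => ([k, gsCnt arr k] : List Int)) := by
    intro a b h
    simp only [List.cons.injEq, and_true] at h
    exact h.1
  have hndP : (gsP arr).Nodup := (PySem.Set.nodup_ofList _).map hinj
  refine (List.perm_ext_iff_of_nodup hndB hndP).mpr ?_
  intro z
  unfold gsB gsP gsCounts gsBucket
  simp only [List.mem_flatMap, List.mem_map, PySem.List.mem_sorted, PySem.Set.mem_ofList,
    List.mem_filter, beq_iff_eq]
  constructor
  · rintro ⟨c, _, k, ⟨hk, hcnt⟩, rfl⟩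
    exact ⟨k, hk, by rw [hcnt]⟩
  · rintro ⟨k, hk, rfl⟩
    exact ⟨gsCnt arr k, ⟨k, hk, rfl⟩, k, ⟨hk, rfl⟩, rfl⟩

-- ===== VERDICT (by name: the statement is the Claim_ definition above) =====
theorem groupSort_spec : Claim_equal_groupSort := by
  intro arr _
  unfold Spec_groupSort
  rw [groupSort_eq_sorted, groupSort_alt_eq_flatMap]
  exact PySem.List.sorted_eq_of_perm_of_pairwise_lt _ _ _ (gs_perm arr) (gs_pairwise arr)
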